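-- pv_equiv track=rewrite | github.com/GabrielPenaU3F/SkyVoiceNet | source/data_processing/word_processor.py | segment_words
-- ===== SOURCE A (Python) =====
-- def segment_words(phrases):
--
--     words_per_phrase = []
--
--     for phrase in phrases:
--         words = []
--         current_word = []
--
--         for entry in phrase:
--             if entry["mark"] == "sp":
--                 if current_word:
--                     words.append(current_word)
--                     current_word = []
--             else:
--                 current_word.append(entry)
--
--         if current_word:
--             words.append(current_word)
--
--         words_per_phrase.append(words)
--
--     return words_per_phrase
-- ===== SOURCE B (Python) =====
-- def segment_words(phrases):
--     return [_words(phrase) for phrase in phrases]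
--
--
-- def _words(phrase):
--     # two-pointer run scanner: skip 'sp' entries, slice out each maximal
--     # run of non-'sp' entries as a word
--     words = []
--     i, n = 0, len(phrase)
--     while i < n:
--         if phrase[i]["mark"] == "sp":
--             i += 1
--         else:
--             j = i + 1
--             while j < n and phrase[j]["mark"] != "sp":
--                 j += 1
--             words.append(phrase[i:j])
--             i = j
--     return words
-- ===== Notes on version B (the rewrite author's own statement) =====
-- stated objective: alternative
-- what changed: Replaces A's accumulator-with-trailing-flush fold by a two-pointer run scanner that slices out each maximal non-'sp' run directly, with no pending current_word state.
import Mathlib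
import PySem

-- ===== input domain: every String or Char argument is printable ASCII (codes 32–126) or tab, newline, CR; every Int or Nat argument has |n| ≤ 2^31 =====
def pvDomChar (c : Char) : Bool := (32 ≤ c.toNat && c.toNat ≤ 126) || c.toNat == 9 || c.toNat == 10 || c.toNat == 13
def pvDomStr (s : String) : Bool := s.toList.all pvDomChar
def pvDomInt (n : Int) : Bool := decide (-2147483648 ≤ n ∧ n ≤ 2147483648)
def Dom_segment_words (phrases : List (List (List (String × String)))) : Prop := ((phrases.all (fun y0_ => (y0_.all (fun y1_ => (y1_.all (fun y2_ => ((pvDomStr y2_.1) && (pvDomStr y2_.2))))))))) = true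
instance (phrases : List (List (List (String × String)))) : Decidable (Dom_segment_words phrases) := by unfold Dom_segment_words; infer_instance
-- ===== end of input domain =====

-- B replaces A's accumulator-with-trailing-flush fold by a run scanner over maximal non-'sp' runs; alternative decomposition, same cost.


-- entry["mark"] == "sp" : dict lookup (first match under the assoc-list convention), exact where the key exists (Pre_ requires it)
def swIsSp (e : List (String × String)) : Bool := (PySem.Dict.mk e).get? "mark" == some "sp"

-- ===== PORT A =====
-- inner loop of A: fold with state (words, current_word), then the trailing flush
def swA_inner (phrase : List (List (String × String))) : List (List (List (String × String))) :=
  let st := phrase.foldl (fun (st : List (List (List (String × String))) × List (List (String × String))) entry =>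
      if swIsSp entry then
        (if st.2.isEmpty then st.1 else st.1 ++ [st.2], [])
      else
        (st.1, st.2 ++ [entry])) ([], [])
  if st.2.isEmpty then st.1 else st.1 ++ [st.2]

def segment_words (phrases : List (List (List (String × String)))) : List (List (List (List (String × String)))) :=
  phrases.foldl (fun acc phrase => acc ++ [swA_inner phrase]) []

-- ===== PORT B =====
-- run scanner: skip 'sp' entries; otherwise take the maximal non-'sp' run as a word (the i/j two-pointer loop of Source B)
def swB_words : List (List (String × String)) → List (List (List (String × String)))
  | [] => []
  | e :: rest =>
    if swIsSp e then swB_words rest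
    else (e :: rest.takeWhile (fun x => !swIsSp x)) :: swB_words (rest.dropWhile (fun x => !swIsSp x))
termination_by l => l.length
decreasing_by
  · simp
  · exact Nat.lt_succ_of_le (List.length_dropWhile_le _ _)

def segment_words_alt (phrases : List (List (List (String × String)))) : List (List (List (List (String × String)))) :=
  phrases.map swB_words

-- ===== PRECONDITION & SPEC =====
-- Pre_ excludes exactly the inputs where Python raises KeyError: some entry lacks the "mark" key.
def Pre_segment_words (phrases : List (List (List (String × String)))) : Prop :=
  (phrases.all (fun ph => ph.all (fun e => e.any (fun kv => kv.1 == "mark")))) = true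
instance (phrases : List (List (List (String × String)))) : Decidable (Pre_segment_words phrases) := by unfold Pre_segment_words; infer_instance
def pvWitness_segment_words : (List (List (List (String × String)))) :=
  [[[("mark", "a")], [("mark", "sp")], [("mark", "sp")], [("mark", "b")], [("mark", "c")]], []]

def Spec_segment_words (phrases : List (List (List (String × String)))) (out : List (List (List (List (String × String))))) : Prop := out = segment_words_alt phrases
instance (phrases : List (List (List (String × String)))) (out : List (List (List (List (String × String))))) : Decidable (Spec_segment_words phrases out) := by unfold Spec_segment_words; infer_instance

-- ===== CLAIM (what is proved, stated in full; the proofs are below) =====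
def Claim_equal_segment_words : Prop := ∀ (phrases : List (List (List (String × String)))), Dom_segment_words phrases → Pre_segment_words phrases → Spec_segment_words phrases (segment_words phrases)

-- ===== LEMMAS AND PROOFS =====

-- A's inner fold, started at (words, cur), is B's run decomposition glued onto the pending word cur
theorem swA_fold_eq (l : List (List (String × String)))
    (words : List (List (List (String × String)))) (cur : List (List (String × String))) :
    (let st := l.foldl (fun (st : List (List (List (String × String))) × List (List (String × String))) entry =>
        if swIsSp entry then
          (if st.2.isEmpty then st.1 else st.1 ++ [st.2], [])
        else
          (st.1, st.2 ++ [entry])) (words, cur)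
     if st.2.isEmpty then st.1 else st.1 ++ [st.2]) =
    words ++ (if cur.isEmpty then swB_words l
              else (cur ++ l.takeWhile (fun x => !swIsSp x)) :: swB_words (l.dropWhile (fun x => !swIsSp x))) := by
  induction l generalizing words cur with
  | nil =>
    cases cur <;> simp [swB_words]
  | cons e rest ih =>
    by_cases hsp : swIsSp e
    · cases cur with
      | nil => simpa [List.foldl_cons, hsp, swB_words] using ih words []
      | cons c cs => simpa [List.foldl_cons, hsp, swB_words] using ih (words ++ [c :: cs]) []
    · cases cur with
      | nil =>
        have := ih words [e]
        simpa [List.foldl_cons, hsp, swB_words, List.takeWhile_cons, List.dropWhile_cons] using this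
      | cons c cs =>
        have := ih words ((c :: cs) ++ [e])
        simpa [List.foldl_cons, hsp, swB_words, List.takeWhile_cons, List.dropWhile_cons] using this

theorem swA_inner_eq (phrase : List (List (String × String))) : swA_inner phrase = swB_words phrase := by
  simpa [swA_inner] using swA_fold_eq phrase [] []

theorem segment_words_fold (phrases : List (List (List (String × String))))
    (acc : List (List (List (List (String × String))))) :
    phrases.foldl (fun acc phrase => acc ++ [swA_inner phrase]) acc = acc ++ phrases.map swB_words := by
  induction phrases generalizing acc with
  | nil => simp
  | cons p ps ih =>
    rw [List.foldl_cons, ih, swA_inner_eq]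
    simp

-- ===== VERDICT (by name: the statement is the Claim_ definition above) =====
theorem segment_words_spec : Claim_equal_segment_words := by
  intro phrases _ _
  show segment_words phrases = segment_words_alt phrases
  simpa [segment_words, segment_words_alt] using segment_words_fold phrases []
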